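-- pv_equiv track=rewrite | github.com/pmekala01/split_genome | testsplit.py | count_consecutive_ambiguous_bases
-- ===== SOURCE A (Python) =====
-- def count_consecutive_ambiguous_bases(segment):
--     max_count = 0
--     current_count = 0
--
--     for base in segment:
--         if base not in 'ACTG':
--             current_count += 1
--             if current_count > max_count:
--                 max_count = current_count
--         else:
--             current_count = 0
--
--     return max_count if max_count > 5000 else 0
-- ===== SOURCE B (Python) =====
-- def count_consecutive_ambiguous_bases(segment):
--     # group the sequence into maximal runs of same ambiguity, keep ambiguous run lengths
--     chars = list(segment)
--     n = len(chars)
--     runs = []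
--     i = 0
--     while i < n:
--         amb = chars[i] not in 'ACTG'
--         j = i + 1
--         while j < n and (chars[j] not in 'ACTG') == amb:
--             j += 1
--         if amb:
--             runs.append(j - i)
--         i = j
--     longest = max(runs, default=0)
--     return longest if longest > 5000 else 0
-- ===== Notes on version B (the rewrite author's own statement) =====
-- stated objective: idiomatic
-- what changed: A keeps an inline running counter with a max update per character; B groups the sequence into maximal runs of equal ambiguity (groupby-style two-level scan) and takes the longest ambiguous run length, thresholding at 5000.
import Mathlib
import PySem

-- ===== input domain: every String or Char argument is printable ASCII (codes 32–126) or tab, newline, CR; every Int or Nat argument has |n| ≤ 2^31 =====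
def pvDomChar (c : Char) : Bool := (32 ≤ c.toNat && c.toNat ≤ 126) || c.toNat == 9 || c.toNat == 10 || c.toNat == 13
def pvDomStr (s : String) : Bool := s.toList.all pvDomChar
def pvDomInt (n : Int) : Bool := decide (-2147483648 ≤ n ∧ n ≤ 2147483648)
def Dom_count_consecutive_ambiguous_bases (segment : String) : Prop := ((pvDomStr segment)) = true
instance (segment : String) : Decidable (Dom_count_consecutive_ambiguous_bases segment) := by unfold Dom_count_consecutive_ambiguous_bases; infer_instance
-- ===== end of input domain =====

-- B replaces A's inline running counter by grouping the string into maximal runs and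
-- taking the longest ambiguous run (objective: idiomatic grouped decomposition; not faster).

-- ===== PORT A =====
-- 'base not in "ACTG"' (a char tested against the 4 bases)
def pvAmb (c : Char) : Bool := !(['A', 'C', 'T', 'G'].contains c)

-- one iteration of A's for-loop on the state (max_count, current_count)
def pvStep (s : Int × Int) (base : Char) : Int × Int :=
  if pvAmb base then
    let cur := s.2 + 1
    (if cur > s.1 then cur else s.1, cur)
  else (s.1, 0)

def count_consecutive_ambiguous_bases (segment : String) : Int :=
  if (segment.toList.foldl pvStep (0, 0)).1 > 5000 then
    (segment.toList.foldl pvStep (0, 0)).1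
  else 0

-- ===== PORT B =====
-- the outer while-loop of Source B: lengths of the maximal ambiguous runs, left to right;
-- takeWhile/dropWhile mirror the inner 'while j < n and (chars[j] not in "ACTG") == amb' scan
def pvRuns : List Char → List Nat
  | [] => []
  | c :: t =>
    let amb := pvAmb c
    let rest := t.dropWhile (fun x => pvAmb x == amb)
    if amb then ((t.takeWhile (fun x => pvAmb x == amb)).length + 1) :: pvRuns rest
    else pvRuns rest
termination_by l => l.length
decreasing_by
  all_goals simp only [List.length_cons]
  all_goals exact Nat.lt_succ_of_le (List.length_dropWhile_le _ _)

def count_consecutive_ambiguous_bases_alt (segment : String) : Int :=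
  if (pvRuns segment.toList).foldl Nat.max 0 > 5000 then
    (((pvRuns segment.toList).foldl Nat.max 0 : Nat) : Int)
  else 0

-- ===== PRECONDITION & SPEC =====
def Spec_count_consecutive_ambiguous_bases (segment : String) (out : Int) : Prop := out = count_consecutive_ambiguous_bases_alt segment
instance (segment : String) (out : Int) : Decidable (Spec_count_consecutive_ambiguous_bases segment out) := by unfold Spec_count_consecutive_ambiguous_bases; infer_instance

-- ===== CLAIM (what is proved, stated in full; the proofs are below) =====
def Claim_equal_count_consecutive_ambiguous_bases : Prop := ∀ (segment : String), Dom_count_consecutive_ambiguous_bases segment → Spec_count_consecutive_ambiguous_bases segment (count_consecutive_ambiguous_bases segment)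

-- ===== LEMMAS AND PROOFS =====

-- A's loop over a block of ambiguous characters: the counter advances by the block length
theorem pvStep_run (run : List Char) : ∀ (m cur : Int), (∀ c ∈ run, pvAmb c = true) →
    cur ≤ m → run.foldl pvStep (m, cur) = (max m (cur + run.length), cur + run.length) := by
  induction run with
  | nil => intro m cur _ h; simp [max_eq_left h]
  | cons c t ih =>
    intro m cur hall h
    have hc : pvAmb c = true := hall c (by simp)
    have ht : ∀ x ∈ t, pvAmb x = true := fun x hx => hall x (by simp [hx])
    simp only [List.foldl_cons, pvStep, hc, if_pos]
    rw [ih _ _ ht (by split <;> omega)]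
    simp only [Prod.mk.injEq, List.length_cons, max_def]
    push_cast
    split_ifs <;> constructor <;> omega

-- the head of a dropWhile result falsifies the predicate
theorem pvDropWhile_head_false {p : Char → Bool} : ∀ {t t' : List Char} {c' : Char},
    t.dropWhile p = c' :: t' → p c' = false := by
  intro t
  induction t with
  | nil => intro t' c' h; simp at h
  | cons d td ih =>
    intro t' c' h
    rw [List.dropWhile_cons] at h
    split_ifs at h with hd
    · exact ih h
    · cases h; simpa using hd

-- dropping a non-ambiguous leading character does not change the ambiguous runs
theorem pvRuns_cons_notAmb (c : Char) (t : List Char) (hc : pvAmb c = false) :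
    pvRuns (c :: t) = pvRuns t := by
  cases t with
  | nil => simp [pvRuns, hc]
  | cons d t' =>
    by_cases hd : pvAmb d = true
    · simp [pvRuns, hc, hd]
    · simp only [Bool.not_eq_true] at hd
      simp [pvRuns, hc, hd]

theorem foldl_natmax (l : List Nat) : ∀ a : Nat, l.foldl Nat.max a = max a (l.foldl Nat.max 0) := by
  induction l with
  | nil => simp
  | cons x t ih =>
    intro a
    rw [List.foldl_cons, ih, List.foldl_cons, ih (Nat.max 0 x)]
    simp [Nat.max_assoc]

-- loop invariant: A's max_count after the whole scan = max of the seed and B's longest run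
theorem pvMain : ∀ (n : Nat) (l : List Char), l.length ≤ n → ∀ (m : Int), 0 ≤ m →
    (l.foldl pvStep (m, 0)).1 = max m ((pvRuns l).foldl Nat.max 0 : Nat) := by
  intro n
  induction n with
  | zero =>
    intro l hl m hm
    have : l = [] := List.eq_nil_of_length_eq_zero (Nat.le_zero.mp hl)
    subst this; simp [pvRuns, max_eq_left hm]
  | succ n ih =>
    intro l hl m hm
    cases l with
    | nil => simp [pvRuns, max_eq_left hm]
    | cons c t =>
      by_cases hc : pvAmb c = true
      · -- ambiguous head: peel the whole ambiguous run
        have hsplit := List.takeWhile_append_dropWhile (p := fun x => pvAmb x) (l := t)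
        set tw := t.takeWhile (fun x => pvAmb x) with htw
        set dw := t.dropWhile (fun x => pvAmb x) with hdw
        have hall : ∀ x ∈ (c :: tw), pvAmb x = true := by
          intro x hx
          rcases List.mem_cons.mp hx with h | h
          · simpa [h] using hc
          · simpa using List.mem_takeWhile_imp (htw ▸ h)
        have hfold : (c :: t).foldl pvStep (m, 0) = dw.foldl pvStep
            (max m ((0 : Int) + (c :: tw).length), (0 : Int) + (c :: tw).length) := by
          conv_lhs => rw [show (c :: t) = (c :: tw) ++ dw by rw [List.cons_append, hsplit]]
          rw [List.foldl_append, pvStep_run _ _ _ hall hm]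
        have hruns : pvRuns (c :: t) = (tw.length + 1) :: pvRuns dw := by
          rw [pvRuns]; simp [hc, ← htw, ← hdw]
        cases hdwc : dw with
        | nil =>
          rw [hfold, hdwc, hruns, hdwc]
          simp only [List.foldl_nil, List.foldl_cons, pvRuns, Nat.zero_max, List.length_cons]
          push_cast; ring_nf
        | cons c' t' =>
          have hc' : pvAmb c' = false := pvDropWhile_head_false (hdw ▸ hdwc)
          have hlen : t'.length ≤ n := by
            have h1 : dw.length ≤ t.length := by rw [hdw]; exact List.length_dropWhile_le _ _
            have h2 : t.length ≤ n := by simpa using Nat.lt_succ_iff.mp (by simpa using hl)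
            rw [hdwc] at h1; simp at h1; omega
          have hm' : (0 : Int) ≤ max m ((0 : Int) + (c :: tw).length) :=
            le_trans hm (le_max_left _ _)
          rw [hfold, hdwc, List.foldl_cons,
            show pvStep (max m ((0 : Int) + (c :: tw).length), (0 : Int) + (c :: tw).length) c'
              = (max m ((0 : Int) + (c :: tw).length), 0) by simp [pvStep, hc'],
            ih t' hlen _ hm', hruns, hdwc, pvRuns_cons_notAmb c' t' hc']
          have hfm : List.foldl Nat.max 0 ((tw.length + 1) :: pvRuns t')
              = max (tw.length + 1) (List.foldl Nat.max 0 (pvRuns t')) := by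
            rw [List.foldl_cons, foldl_natmax]; simp
          rw [hfm]
          simp only [List.length_cons]
          push_cast
          simp only [max_def]
          split_ifs <;> omega
      · -- non-ambiguous head: state unchanged
        simp only [Bool.not_eq_true] at hc
        rw [List.foldl_cons, show pvStep (m, 0) c = (m, 0) by simp [pvStep, hc],
          pvRuns_cons_notAmb c t hc]
        exact ih t (by simpa using Nat.lt_succ_iff.mp (by simpa using hl)) m hm

-- ===== VERDICT (by name: the statement is the Claim_ definition above) =====
theorem count_consecutive_ambiguous_bases_spec : Claim_equal_count_consecutive_ambiguous_bases := by
  intro segment _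
  unfold Spec_count_consecutive_ambiguous_bases count_consecutive_ambiguous_bases
    count_consecutive_ambiguous_bases_alt
  have h := pvMain segment.toList.length segment.toList le_rfl 0 le_rfl
  rw [h, max_eq_right (by positivity)]
  split <;> split <;> omega
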